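-- pv_equiv track=rewrite | github.com/dlcofud/- | 프로그래머스/비밀지도.py | solution
-- ===== SOURCE A (Python) =====
-- def solution(n, arr1, arr2):
--     answer = []
--     secret=[[' ' for _ in range(n)]for _ in range(n)]
--     for z in range(2):
--         for x in range(n):
--             if z==0:
--                 number=arr1[x]
--             if z==1:
--                 number=arr2[x]
--             number=bin(number)
--             number=number[2:]
--             if len(number)<n:
--                 addnumber='0'*(n-len(number))
--                 number=addnumber+number
--             for y in range(n):
--                 if number[y]=='1':
--                     secret[x][y]='#'
--     for x in range(n):
--         answer.append(''.join(secret[x]))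
--     return answer
-- ===== SOURCE B (Python) =====
-- def solution(n, arr1, arr2):
--     def bits(v):
--         s = bin(v)[2:]
--         if len(s) < n:
--             s = '0' * (n - len(s)) + s
--         return s
--     answer = []
--     for x in range(n):
--         s1 = bits(arr1[x])
--         s2 = bits(arr2[x])
--         answer.append(''.join('#' if s1[y] == '1' or s2[y] == '1' else ' '
--                               for y in range(n)))
--     return answer
-- ===== Notes on version B (the rewrite author's own statement) =====
-- stated objective: simpler
-- what changed: Replaces A's mutable n-by-n char grid with its two separate marking passes (z=0 over arr1, z=1 over arr2) and a final join pass by a single per-row pass that combines both rows' bit strings character-by-character directly into the output string.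
import Mathlib
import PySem

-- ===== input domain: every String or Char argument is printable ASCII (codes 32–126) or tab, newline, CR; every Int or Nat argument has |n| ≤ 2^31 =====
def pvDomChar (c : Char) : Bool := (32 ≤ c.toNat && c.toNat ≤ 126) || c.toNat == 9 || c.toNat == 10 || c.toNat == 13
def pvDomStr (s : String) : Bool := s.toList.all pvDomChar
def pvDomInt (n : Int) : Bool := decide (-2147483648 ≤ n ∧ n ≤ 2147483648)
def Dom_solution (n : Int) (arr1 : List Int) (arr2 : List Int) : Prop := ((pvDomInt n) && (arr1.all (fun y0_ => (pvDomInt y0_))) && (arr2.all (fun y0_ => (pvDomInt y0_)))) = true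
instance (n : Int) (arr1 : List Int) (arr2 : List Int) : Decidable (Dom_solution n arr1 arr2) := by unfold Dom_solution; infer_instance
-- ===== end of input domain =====

-- B replaces A's mutable 2D grid with its two separate marking passes by a single
-- per-row pass combining both rows' bit strings directly into the output string (objective: simpler).

-- bin(v)[2:] : binary digits of v; for v < 0 this keeps Python's stray 'b' from '-0b…'[2:]
def pvNatBits : Nat → List Char
  | 0 => []
  | (m+1) => pvNatBits ((m+1) / 2) ++ [if (m+1) % 2 = 1 then '1' else '0']
decreasing_by exact Nat.div_lt_self (Nat.succ_pos m) (by norm_num)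

def pvBinTail (v : Int) : List Char :=
  if v = 0 then ['0']
  else if 0 < v then pvNatBits v.toNat
  else 'b' :: pvNatBits (-v).toNat

-- left-pad with '0' ONLY when shorter than N (as Python A and B both do)
def pvPad (N : Nat) (s : List Char) : List Char :=
  if s.length < N then List.replicate (N - s.length) '0' ++ s else s

-- ===== PORT A =====
def solution (n : Int) (arr1 : List Int) (arr2 : List Int) : List String :=
  let N := n.toNat
  let secret0 : List (List Char) := List.replicate N (List.replicate N ' ')
  let secret := (List.range 2).foldl (fun secret z =>
    (List.range N).foldl (fun secret x =>
      -- Python's two ifs: number = arr1[x] if z==0, overwritten by arr2[x] if z==1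
      let number := if z == 1 then arr2.getD x 0 else arr1.getD x 0
      let number := pvPad N (pvBinTail number)
      (List.range N).foldl (fun secret y =>
        if number.getD y ' ' = '1' then secret.modify x (fun row => row.set y '#')
        else secret) secret) secret) secret0
  (List.range N).foldl (fun answer x => answer ++ [String.mk (secret.getD x [])]) []

-- ===== PORT B =====
def solution_alt (n : Int) (arr1 : List Int) (arr2 : List Int) : List String :=
  let N := n.toNat
  (List.range N).map (fun x =>
    let s1 := pvPad N (pvBinTail (arr1.getD x 0))
    let s2 := pvPad N (pvBinTail (arr2.getD x 0))
    String.mk ((List.range N).map (fun y =>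
      if s1.getD y ' ' = '1' ∨ s2.getD y ' ' = '1' then '#' else ' ')))

-- ===== PRECONDITION & SPEC =====
-- Pre_ excludes exactly the inputs where Python A raises IndexError: 0 < n but a row array shorter than n.
def Pre_solution (n : Int) (arr1 : List Int) (arr2 : List Int) : Prop :=
  0 < n → (n ≤ arr1.length ∧ n ≤ arr2.length)
instance (n : Int) (arr1 : List Int) (arr2 : List Int) : Decidable (Pre_solution n arr1 arr2) := by
  unfold Pre_solution; infer_instance
def pvWitness_solution : Int × List Int × List Int := (2, [1, 2], [3, 1])

def Spec_solution (n : Int) (arr1 : List Int) (arr2 : List Int) (out : List String) : Prop := out = solution_alt n arr1 arr2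
instance (n : Int) (arr1 : List Int) (arr2 : List Int) (out : List String) : Decidable (Spec_solution n arr1 arr2 out) := by unfold Spec_solution; infer_instance

-- ===== CLAIM (what is proved, stated in full; the proofs are below) =====
def Claim_equal_solution : Prop := ∀ (n : Int) (arr1 : List Int) (arr2 : List Int), Dom_solution n arr1 arr2 → Pre_solution n arr1 arr2 → Spec_solution n arr1 arr2 (solution n arr1 arr2)

-- ===== LEMMAS AND PROOFS =====

lemma pv_modify_id (l : List (List Char)) (x : Nat) :
    l.modify x (fun r => r) = l := by
  induction l generalizing x with
  | nil => simp [List.modify_nil]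
  | cons a t ih => cases x <;> simp [List.modify_zero_cons, List.modify_succ_cons, ih]

lemma pv_modify_modify (l : List (List Char)) (x : Nat) (f g : List Char → List Char) :
    (l.modify x f).modify x g = l.modify x (fun r => g (f r)) := by
  induction l generalizing x with
  | nil => simp [List.modify_nil]
  | cons a t ih => cases x <;> simp [List.modify_zero_cons, List.modify_succ_cons, ih]

lemma pv_getElem?_modify (l : List (List Char)) (x i : Nat) (f : List Char → List Char) :
    (l.modify x f)[i]? = if x = i then l[i]?.map f else l[i]? := by
  induction l generalizing x i with
  | nil => simp [List.modify_nil]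
  | cons a t ih =>
    cases x <;> cases i <;> simp [List.modify_zero_cons, List.modify_succ_cons, ih]

-- the inner y-loop on the grid is a single modify of row x
lemma pv_foldl_if_modify (L : List Nat) (x : Nat) (c : Nat → Prop) [DecidablePred c]
    (f : Nat → List Char → List Char) (secret : List (List Char)) :
    L.foldl (fun sec y => if c y then sec.modify x (f y) else sec) secret
      = secret.modify x (fun row => L.foldl (fun r y => if c y then f y r else r) row) := by
  induction L generalizing secret with
  | nil => simp [pv_modify_id]
  | cons y L ih =>
    by_cases h : c y
    · simp only [List.foldl_cons, h, if_true, ih, pv_modify_modify]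
    · simp only [List.foldl_cons, h]
      simp [ih, h]

-- one pass of per-row modifies, read back elementwise
lemma pv_foldl_modify_getElem? (L : List Nat) (hL : L.Nodup)
    (g : Nat → List Char → List Char) (sec : List (List Char)) (i : Nat) :
    (L.foldl (fun s x => s.modify x (g x)) sec)[i]?
      = if i ∈ L then sec[i]?.map (g i) else sec[i]? := by
  induction L generalizing sec with
  | nil => simp
  | cons x L ih =>
    rcases List.nodup_cons.mp hL with ⟨hx, hL'⟩
    by_cases hi : i ∈ L
    · have hne : x ≠ i := by rintro rfl; exact hx hi
      simp [ih hL', hi, pv_getElem?_modify, hne]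
    · by_cases hxi : x = i
      · subst hxi
        simp [ih hL', hi, pv_getElem?_modify]
      · simp [ih hL', hi, pv_getElem?_modify, hxi, List.mem_cons]
        tauto

lemma pv_foldl_set_length (L : List Nat) (c : Nat → Prop) [DecidablePred c] (row : List Char) :
    (L.foldl (fun r y => if c y then r.set y '#' else r) row).length = row.length := by
  induction L generalizing row with
  | nil => rfl
  | cons y L ih =>
    by_cases h : c y <;> simp [h, ih, List.length_set]

lemma pv_foldl_set_getElem? (L : List Nat) (c : Nat → Prop) [DecidablePred c] (row : List Char) (i : Nat) :
    (L.foldl (fun r y => if c y then r.set y '#' else r) row)[i]?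
      = if i ∈ L ∧ c i ∧ i < row.length then some '#' else row[i]? := by
  induction L generalizing row with
  | nil => simp
  | cons y L ih =>
    by_cases h : c y
    · simp only [List.foldl_cons, h, if_true]
      rw [ih, List.length_set]
      have hset : (row.set y '#')[i]? = if y = i ∧ i < row.length then some '#' else row[i]? := by
        rw [List.getElem?_set]
        by_cases hyi : y = i
        · subst hyi
          by_cases hl : y < row.length
          · simp [hl]
          · simp [hl, List.getElem?_eq_none (Nat.le_of_not_lt hl)]
        · simp [hyi]
      rw [hset]
      by_cases hiy : i = y <;> by_cases hci : c i <;>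
        by_cases hl : i < row.length <;> by_cases hiL : i ∈ L <;>
        simp_all [List.mem_cons] <;> (intro hh; exact absurd hh.symm hiy)
    · simp only [List.foldl_cons, h, Bool.false_eq_true, if_false]
      rw [ih]
      by_cases hiy : i = y
      · subst hiy; simp [h, List.mem_cons]
      · simp [List.mem_cons, hiy]

lemma pv_foldl_append_map (L : List Nat) (f : Nat → String) (acc : List String) :
    L.foldl (fun a x => a ++ [f x]) acc = acc ++ L.map f := by
  induction L generalizing acc with
  | nil => simp
  | cons x L ih => simp [ih]

-- the combined two marking passes on an all-blank row, elementwise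
lemma pv_row_char (N : Nat) (c1 c2 : Nat → Prop) [DecidablePred c1] [DecidablePred c2] (i : Nat) :
    ((List.range N).foldl (fun r y => if c2 y then r.set y '#' else r)
      ((List.range N).foldl (fun r y => if c1 y then r.set y '#' else r)
        (List.replicate N ' ')))[i]?
      = if i < N then some (if c1 i ∨ c2 i then '#' else ' ') else none := by
  rw [pv_foldl_set_getElem?, pv_foldl_set_length, pv_foldl_set_getElem?]
  simp only [List.length_replicate, List.mem_range, List.getElem?_replicate]
  split_ifs <;> simp_all

theorem solution_spec : Claim_equal_solution := by
  intro n arr1 arr2 _ _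
  unfold Spec_solution solution solution_alt
  set N := n.toNat with hN
  -- the grid after both passes
  simp only [show List.range 2 = [0, 1] by decide, List.foldl_cons, List.foldl_nil]
  simp only [pv_foldl_if_modify]
  simp only [show ((0 : Nat) == 1) = false by decide, show ((1 : Nat) == 1) = true by decide,
    Bool.false_eq_true, if_false, if_true]
  rw [pv_foldl_append_map, List.nil_append]
  apply List.map_congr_left
  intro x hx
  have hxN : x < N := List.mem_range.mp hx
  rw [List.getD_eq_getElem?_getD,
    pv_foldl_modify_getElem? _ List.nodup_range, pv_foldl_modify_getElem? _ List.nodup_range]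
  simp only [hx, if_pos, List.getElem?_replicate, hxN, Option.map_some, Option.getD_some]
  apply congrArg
  apply List.ext_getElem?
  intro i
  rw [pv_row_char]
  by_cases hi : i < N
  · simp [hi]
  · simp [hi]
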